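-- pv_equiv track=rewrite | github.com/rainhaworth/ProteinCompletion | utils/mask.py | idx_to_segments
-- ===== SOURCE A (Python) =====
-- def idx_to_segments(idx):
--     segments = []
--     seg_start = idx[0]
--     prev = seg_start
--     # iterate over elements past first
--     for i in idx[1:]:
--         if i - prev == 1:
--             # expand segment
--             prev = i
--         else:
--             # complete segment
--             segments.append((seg_start, prev))
--             # start new segment
--             seg_start = i
--             prev = i
--     # add last segment
--     segments.append((seg_start, idx[-1]))
--
--     return segments
-- ===== SOURCE B (Python) =====
-- def idx_to_segments(idx):
--     # boundary-detection decomposition: find all non-consecutive adjacent pairs,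
--     # then zip the segment starts with the segment ends
--     pairs = list(zip(idx, idx[1:]))
--     starts = [idx[0]] + [b for a, b in pairs if b - a != 1]
--     ends = [a for a, b in pairs if b - a != 1] + [idx[-1]]
--     return list(zip(starts, ends))
-- ===== Notes on version B (the rewrite author's own statement) =====
-- stated objective: simpler
-- what changed: Replaced the stateful seg_start/prev accumulator loop by a declarative two-phase boundary decomposition: filter non-consecutive adjacent pairs from zip(idx, idx[1:]) to get segment starts and ends, then zip them together.
import Mathlib
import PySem

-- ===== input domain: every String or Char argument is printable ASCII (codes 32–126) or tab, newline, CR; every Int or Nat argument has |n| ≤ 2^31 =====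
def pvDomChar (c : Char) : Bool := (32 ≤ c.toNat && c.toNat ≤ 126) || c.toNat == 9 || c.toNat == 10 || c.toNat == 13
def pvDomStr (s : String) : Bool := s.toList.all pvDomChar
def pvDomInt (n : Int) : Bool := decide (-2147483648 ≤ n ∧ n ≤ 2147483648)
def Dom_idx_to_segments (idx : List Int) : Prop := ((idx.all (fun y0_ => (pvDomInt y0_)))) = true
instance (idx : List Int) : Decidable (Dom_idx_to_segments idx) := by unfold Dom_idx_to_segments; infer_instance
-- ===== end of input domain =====

-- B replaces A's stateful seg_start/prev loop by a boundary-detection decomposition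
-- (filter non-consecutive adjacent pairs of zip(idx, idx[1:]), then zip starts with ends); same O(n) cost.


-- ===== PORT A =====
-- Literal port of A: the first-element subscript is taken by the nonempty-list match (Python raises IndexError on [],
-- excluded by Pre_); idx[1:] is rest; the for-loop is a foldl over state (segments, seg_start, prev);
-- idx[-1] is pyGet? idx (-1), in range since idx ≠ [] (.getD 0 is never the default under Pre_).
def idx_to_segments (idx : List Int) : List (Int × Int) :=
  match idx with
  | [] => []
  | x :: rest =>
    let st := rest.foldl
      (fun (st : List (Int × Int) × Int × Int) i =>
        if i - st.2.2 = 1 then (st.1, st.2.1, i)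
        else (st.1 ++ [(st.2.1, st.2.2)], i, i))
      ([], x, x)
    st.1 ++ [(st.2.1, (PySem.List.pyGet? idx (-1)).getD 0)]

-- ===== PORT B =====
-- Literal port of Source B: pairs = zip(idx, idx[1:]); starts = first-element-singleton + [b for (a,b) in pairs if b-a != 1];
-- ends = [a for (a,b) in pairs if b-a != 1] + [idx[-1]]; result = zip(starts, ends).
-- the first-element subscript via the nonempty match (Python raises IndexError on []); idx[-1] via pyGet? as in A's port.
def idx_to_segments_alt (idx : List Int) : List (Int × Int) :=
  match idx with
  | [] => []
  | x :: rest =>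
    let pairs := idx.zip rest
    let starts := x :: (pairs.filter (fun p => p.2 - p.1 != 1)).map Prod.snd
    let ends := (pairs.filter (fun p => p.2 - p.1 != 1)).map Prod.fst
                  ++ [(PySem.List.pyGet? idx (-1)).getD 0]
    starts.zip ends

-- ===== PRECONDITION & SPEC =====
-- Pre_ excludes exactly the empty list, on which Python A raises IndexError reading the first element (B raises there too).
def Pre_idx_to_segments (idx : List Int) : Prop := idx ≠ []
instance (idx : List Int) : Decidable (Pre_idx_to_segments idx) := by
  unfold Pre_idx_to_segments; infer_instance

def pvWitness_idx_to_segments : List Int := [1, 2, 3, 7, 8, 11]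

def Spec_idx_to_segments (idx : List Int) (out : List (Int × Int)) : Prop := out = idx_to_segments_alt idx
instance (idx : List Int) (out : List (Int × Int)) : Decidable (Spec_idx_to_segments idx out) := by unfold Spec_idx_to_segments; infer_instance

-- ===== CLAIM (what is proved, stated in full; the proofs are below) =====
def Claim_equal_idx_to_segments : Prop := ∀ (idx : List Int), Dom_idx_to_segments idx → Pre_idx_to_segments idx → Spec_idx_to_segments idx (idx_to_segments idx)

-- ===== LEMMAS AND PROOFS =====

-- Common reference value: run decomposition of a nonempty list; (s, p) is the open segment, the list the tail.
def segsSpec (s p : Int) : List Int → List (Int × Int)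
  | [] => [(s, p)]
  | i :: l => if i - p = 1 then segsSpec s i l else (s, p) :: segsSpec i i l

-- replace the start of the first segment
def setHdFst (s : Int) : List (Int × Int) → List (Int × Int)
  | [] => []
  | (_, e) :: l => (s, e) :: l

-- ---- A side: the loop state yields the run decomposition; prev at segment end is idx's last element ----
theorem foldA_eq (l : List Int) (acc : List (Int × Int)) (s p : Int) :
    (l.foldl
      (fun (st : List (Int × Int) × Int × Int) i =>
        if i - st.2.2 = 1 then (st.1, st.2.1, i)
        else (st.1 ++ [(st.2.1, st.2.2)], i, i))
      (acc, s, p)).1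
      ++ [((l.foldl
      (fun (st : List (Int × Int) × Int × Int) i =>
        if i - st.2.2 = 1 then (st.1, st.2.1, i)
        else (st.1 ++ [(st.2.1, st.2.2)], i, i))
      (acc, s, p)).2.1,
      l.getLastD p)] = acc ++ segsSpec s p l := by
  induction l generalizing acc s p with
  | nil => simp [segsSpec]
  | cons i l ih =>
    rw [List.getLastD_cons, List.foldl_cons]
    by_cases h : i - p = 1
    · show (List.foldl _ (if i - p = 1 then (acc, s, i) else (acc ++ [(s, p)], i, i)) l).1 ++ _ = _
      rw [if_pos h, ih acc s i]
      simp [segsSpec, h]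
    · show (List.foldl _ (if i - p = 1 then (acc, s, i) else (acc ++ [(s, p)], i, i)) l).1 ++ _ = _
      rw [if_neg h, ih (acc ++ [(s, p)]) i i]
      simp [segsSpec, h]

theorem A_eq_segsSpec (x : Int) (rest : List Int) :
    idx_to_segments (x :: rest) = segsSpec x x rest := by
  have hlast : (PySem.List.pyGet? (x :: rest) (-1)).getD 0 = rest.getLastD x := by
    rw [PySem.List.pyGet?_neg_one]
    simp [List.getLast?_cons]
  have := foldA_eq rest [] x x
  simpa [idx_to_segments, hlast] using this

-- ---- B side: the first segment's start is the only part depending on the head ----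
theorem setHdFst_segsSpec (l : List Int) (s s' p : Int) :
    setHdFst s (segsSpec s' p l) = segsSpec s p l := by
  induction l generalizing p with
  | nil => rfl
  | cons i l ih =>
    by_cases h : i - p = 1
    · rw [segsSpec, if_pos h, segsSpec, if_pos h, ih]
    · rw [segsSpec, if_neg h, segsSpec, if_neg h]; rfl

theorem B_eq_segsSpec (x : Int) (rest : List Int) :
    idx_to_segments_alt (x :: rest) = segsSpec x x rest := by
  induction rest generalizing x with
  | nil =>
    simp [idx_to_segments_alt, segsSpec, PySem.List.pyGet?_neg_one]
  | cons y t ih =>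
    have hlast : (PySem.List.pyGet? (x :: y :: t) (-1)).getD 0
        = (PySem.List.pyGet? (y :: t) (-1)).getD 0 := by
      rw [PySem.List.pyGet?_neg_one, PySem.List.pyGet?_neg_one]
      simp [List.getLast?_cons]
    by_cases h : y - x = 1
    · -- (x, y) consecutive: same break pairs, only the first segment's start changes from y to x
      have hb : (y - x != 1) = false := by simp [h]
      have hstep : idx_to_segments_alt (x :: y :: t)
          = setHdFst x (idx_to_segments_alt (y :: t)) := by
        simp only [idx_to_segments_alt, List.zip_cons_cons, List.filter_cons, hb, hlast,
          Bool.false_eq_true, if_false]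
        cases hE : ((((y :: t).zip t).filter (fun p => p.2 - p.1 != 1)).map Prod.fst
                  ++ [(PySem.List.pyGet? (y :: t) (-1)).getD 0]) with
        | nil => simp at hE
        | cons e E => simp [List.zip, setHdFst]
      rw [hstep, ih, setHdFst_segsSpec, segsSpec, if_pos h]
    · -- (x, y) is a break: it contributes start y and end x, and the head opens segment (x, x)
      have hb : (y - x != 1) = true := by simp [h]
      have hstep : idx_to_segments_alt (x :: y :: t)
          = (x, x) :: idx_to_segments_alt (y :: t) := by
        simp only [idx_to_segments_alt, List.zip_cons_cons, List.filter_cons, hb, hlast, if_true,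
          List.map_cons, List.cons_append]
      rw [hstep, ih, segsSpec, if_neg h]

-- ===== VERDICT (by name: the statement is the Claim_ definition above) =====
theorem idx_to_segments_spec : Claim_equal_idx_to_segments := by
  intro idx _ hpre
  cases idx with
  | nil => exact absurd rfl hpre
  | cons x rest =>
    unfold Spec_idx_to_segments
    rw [A_eq_segsSpec, B_eq_segsSpec]
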